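-- pv_equiv track=rewrite | github.com/zimpha/competitive-programming | google-code-jam/2020/round2/incremental-house-of-pancakes.py | solve
-- ===== SOURCE A (Python) =====
-- def solve(L, R, x):
--     if L < x or R < x + 1:
--         return L, R, x - 1
--     left, right = 0, 10 ** 18
--     while left < right:
--         m = (left + right + 1) // 2
--         if L >= (m + x) * (m + 1) and R >= (m + 1 + x) * (m + 1):
--             left = m
--         else:
--             right = m - 1
--     L -= (left + x) * (left + 1)
--     R -= (left + 1 + x) * (left + 1)
--     return L, R, x + left * 2 + 1
-- ===== SOURCE B (Python) =====
-- def isqrt(n):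
--     # floor integer square root by Newton iteration (pure int arithmetic)
--     if n <= 1:
--         return n
--     guess = n // 2
--     while True:
--         nxt = (guess + n // guess) // 2
--         if nxt < guess:
--             guess = nxt
--         else:
--             return guess
--
--
-- def solve(L, R, x):
--     if L < x or R < x + 1:
--         return L, R, x - 1
--     # largest m >= 0 with (m+x)(m+1) <= L:  (2m+x+1)^2 <= (x+1)^2 + 4(L-x)
--     s1 = isqrt((x + 1) * (x + 1) + 4 * (L - x))
--     # largest m >= 0 with (m+1+x)(m+1) <= R:  (2m+x+2)^2 <= (x+2)^2 + 4(R-x-1)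
--     s2 = isqrt((x + 2) * (x + 2) + 4 * (R - x - 1))
--     m1 = (s1 - x - 1) // 2
--     m2 = (s2 - x - 2) // 2
--     left = min(m1, m2)
--     L -= (left + x) * (left + 1)
--     R -= (left + 1 + x) * (left + 1)
--     return L, R, x + left * 2 + 1
-- ===== Notes on version B (the rewrite author's own statement) =====
-- stated objective: alternative
-- what changed: Replaces A's fixed-range [0,10^18] binary search with a closed-form solution: each quadratic condition (m+x)(m+1) <= L is solved exactly via an integer Newton isqrt of its discriminant, and left = min of the two floor roots.
import Mathlib
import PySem

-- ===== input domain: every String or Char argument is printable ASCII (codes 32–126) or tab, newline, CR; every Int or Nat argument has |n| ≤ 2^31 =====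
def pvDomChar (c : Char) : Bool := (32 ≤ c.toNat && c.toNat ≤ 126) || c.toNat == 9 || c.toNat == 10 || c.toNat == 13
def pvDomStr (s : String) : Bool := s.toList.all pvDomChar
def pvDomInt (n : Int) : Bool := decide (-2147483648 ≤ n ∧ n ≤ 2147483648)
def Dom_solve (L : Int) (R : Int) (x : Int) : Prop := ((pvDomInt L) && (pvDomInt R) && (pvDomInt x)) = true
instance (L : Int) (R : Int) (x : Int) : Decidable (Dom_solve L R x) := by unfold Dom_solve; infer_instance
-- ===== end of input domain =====

-- B replaces A's 60-step binary search by a closed-form solution of the two quadratic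
-- inequalities via an integer Newton square root (objective: alternative algorithm).


-- midpoint bounds, cited by solveLoop's decreasing_by
theorem pvMid (l r : Int) (h : l < r) :
    l + 1 ≤ PySem.Int.floordiv (l + r + 1) 2 ∧ PySem.Int.floordiv (l + r + 1) 2 ≤ r := by
  have h2 := PySem.Int.floordiv_two_mid_bounds (lo := l + 1) (hi := r) (by omega)
  rwa [show l + 1 + r = l + r + 1 by ring] at h2

-- ===== PORT A =====
-- the 'while left < right' binary-search loop of A, state (left, right)
def solveLoop (L R x left right : Int) : Int :=
  if hlr : left < right then
    let m := PySem.Int.floordiv (left + right + 1) 2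
    if (m + x) * (m + 1) ≤ L ∧ (m + 1 + x) * (m + 1) ≤ R then
      solveLoop L R x m right
    else
      solveLoop L R x left (m - 1)
  else left
termination_by (right - left).toNat
decreasing_by
  · have := pvMid left right hlr; omega
  · have := pvMid left right hlr; omega

def solve (L : Int) (R : Int) (x : Int) : Int × Int × Int :=
  if L < x ∨ R < x + 1 then (L, R, x - 1)
  else
    let lf := solveLoop L R x 0 (10 ^ 18)
    (L - (lf + x) * (lf + 1), R - (lf + 1 + x) * (lf + 1), x + lf * 2 + 1)

-- ===== PORT B =====
-- the 'while True' Newton loop of Source B's isqrt (the '0 < guess' guard only makes the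
-- recursion well-founded; Source B never reaches guess ≤ 0)
def isqrtLoop (n guess : Int) : Int :=
  if hg : 0 < guess then
    let nxt := PySem.Int.floordiv (guess + PySem.Int.floordiv n guess) 2
    if nxt < guess then isqrtLoop n nxt else guess
  else guess
termination_by guess.toNat
decreasing_by omega

-- Source B's isqrt
def pyIsqrt (n : Int) : Int :=
  if n ≤ 1 then n else isqrtLoop n (PySem.Int.floordiv n 2)

def solve_alt (L : Int) (R : Int) (x : Int) : Int × Int × Int :=
  if L < x ∨ R < x + 1 then (L, R, x - 1)
  else
    let s1 := pyIsqrt ((x + 1) * (x + 1) + 4 * (L - x))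
    let s2 := pyIsqrt ((x + 2) * (x + 2) + 4 * (R - x - 1))
    let m1 := PySem.Int.floordiv (s1 - x - 1) 2
    let m2 := PySem.Int.floordiv (s2 - x - 2) 2
    let left := min m1 m2
    (L - (left + x) * (left + 1), R - (left + 1 + x) * (left + 1), x + left * 2 + 1)

-- ===== PRECONDITION & SPEC =====
def Spec_solve (L : Int) (R : Int) (x : Int) (out : Int × Int × Int) : Prop := out = solve_alt L R x
instance (L : Int) (R : Int) (x : Int) (out : Int × Int × Int) : Decidable (Spec_solve L R x out) := by unfold Spec_solve; infer_instance

-- ===== CLAIM (what is proved, stated in full; the proofs are below) =====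
def Claim_equal_solve : Prop := ∀ (L : Int) (R : Int) (x : Int), Dom_solve L R x → Spec_solve L R x (solve L R x)

-- ===== LEMMAS AND PROOFS =====

-- Newton loop: if guess dominates every integer square root candidate, it converges to floor √n
theorem pvIsqrtLoop_spec (n : Int) (hn : 2 ≤ n) :
    ∀ (k : Nat) (g : Int), g.toNat ≤ k → 1 ≤ g → (∀ t : Int, 0 ≤ t → t * t ≤ n → t ≤ g) →
      0 ≤ isqrtLoop n g ∧ isqrtLoop n g * isqrtLoop n g ≤ n ∧
        n < (isqrtLoop n g + 1) * (isqrtLoop n g + 1) := by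
  intro k
  induction k with
  | zero => intro g hk hg _; omega
  | succ k ih =>
    intro g hk hg hinv
    rw [isqrtLoop, dif_pos (show 0 < g by omega)]
    set q := PySem.Int.floordiv n g with hq
    set nxt := PySem.Int.floordiv (g + q) 2 with hnxt
    have hinv' : ∀ t : Int, 0 ≤ t → t * t ≤ n → t ≤ nxt := by
      intro t ht htn
      have h1 : 2 * t - g ≤ q := by
        rw [hq, PySem.Int.le_floordiv_iff_mul_le (by omega)]
        nlinarith [sq_nonneg (g - t)]
      rw [hnxt, PySem.Int.le_floordiv_iff_mul_le (by norm_num)]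
      omega
    by_cases h : nxt < g
    · rw [if_pos h]
      have h1 : 1 ≤ nxt := hinv' 1 (by norm_num) (by omega)
      exact ih nxt (by omega) h1 hinv'
    · rw [if_neg h]
      push_neg at h
      have hqg : g ≤ q := by
        have := (PySem.Int.le_floordiv_iff_mul_le (a := g + q) (b := 2) (q := g) (by norm_num)).mp h
        omega
      have hgg : g * g ≤ n := by
        have := (PySem.Int.le_floordiv_iff_mul_le (a := n) (b := g) (q := g) (by omega)).mp (by omega)
        linarith
      refine ⟨by omega, hgg, ?_⟩
      by_contra hc
      push_neg at hc
      have := hinv (g + 1) (by omega) hc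
      omega

-- Source B's isqrt computes the floor square root
theorem pvIsqrt_spec (n : Int) (hn : 0 ≤ n) :
    0 ≤ pyIsqrt n ∧ pyIsqrt n * pyIsqrt n ≤ n ∧ n < (pyIsqrt n + 1) * (pyIsqrt n + 1) := by
  rw [pyIsqrt]
  by_cases h : n ≤ 1
  · rw [if_pos h]
    interval_cases n <;> norm_num
  · rw [if_neg h]
    push_neg at h
    have hg : 1 ≤ PySem.Int.floordiv n 2 := by
      rw [PySem.Int.le_floordiv_iff_mul_le (by norm_num)]; omega
    refine pvIsqrtLoop_spec n (by omega) (PySem.Int.floordiv n 2).toNat _ le_rfl hg ?_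
    intro t ht htn
    rw [PySem.Int.le_floordiv_iff_mul_le (by norm_num)]
    rcases le_or_gt t 1 with h1 | h1
    · omega
    · nlinarith

-- closed-form root: m0 = (s - c - 1) // 2 with s = ⌊√((c+1)² + 4(B-c))⌋ is the largest
-- m ≥ 0 with (m+c)(m+1) ≤ B
theorem pvQuad (c B s m0 : Int) (hcB : c ≤ B)
    (hs0 : 0 ≤ s) (hs1 : s * s ≤ (c + 1) * (c + 1) + 4 * (B - c))
    (hs2 : (c + 1) * (c + 1) + 4 * (B - c) < (s + 1) * (s + 1))
    (hf1 : m0 * 2 ≤ s - c - 1) (hf2 : s - c - 1 < (m0 + 1) * 2) :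
    0 ≤ m0 ∧ (m0 + c) * (m0 + 1) ≤ B ∧ ∀ m : Int, 0 ≤ m → (m + c) * (m + 1) ≤ B → m ≤ m0 := by
  have habs1 : c + 1 ≤ s := by nlinarith
  have habs2 : -(c + 1) ≤ s := by nlinarith
  have hm00 : 0 ≤ m0 := by omega
  refine ⟨hm00, ?_, ?_⟩
  · -- u := 2*m0 + c + 1 satisfies s - 1 ≤ u ≤ s, so u² ≤ s² ≤ D (u = -1 is impossible)
    rcases le_or_gt 0 (2 * m0 + c + 1) with hu | hu
    · nlinarith [sq_nonneg (2 * m0 + c + 1)]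
    · exfalso
      have hs : s = 0 := by omega
      have hc1 : (c + 1) * (c + 1) = 0 := by nlinarith
      have : c + 1 = 0 := by exact mul_self_eq_zero.mp hc1
      omega
  · intro m hm hmB
    have hv : 2 * m + c + 1 ≤ s := by nlinarith
    omega

-- downward closure: the solution set of (m+c)(m+1) ≤ bnd is an interval containing 0
theorem pvClosure (c bnd m M : Int) (h0 : 0 ≤ m) (hmM : m ≤ M) (hc : c ≤ bnd)
    (hM : (M + c) * (M + 1) ≤ bnd) : (m + c) * (m + 1) ≤ bnd := by
  rcases le_or_gt (m + c + 1) 0 with h | h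
  · nlinarith [mul_nonneg h0 (by omega : (0:Int) ≤ -(m + c + 1))]
  · nlinarith [mul_nonneg (by omega : (0:Int) ≤ M - m) (by omega : (0:Int) ≤ M + m + c + 1)]

-- A's binary search returns M, the largest m in [0, right] satisfying both inequalities
theorem pvLoop (L R x M : Int) (hM0 : 0 ≤ M)
    (hPL : (M + x) * (M + 1) ≤ L) (hPR : (M + 1 + x) * (M + 1) ≤ R)
    (hLx : x ≤ L) (hRx : x + 1 ≤ R)
    (hmax : ∀ m : Int, 0 ≤ m → (m + x) * (m + 1) ≤ L → (m + 1 + x) * (m + 1) ≤ R → m ≤ M) :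
    ∀ (k : Nat) (left right : Int), (right - left).toNat ≤ k → 0 ≤ left → left ≤ M →
      M ≤ right → solveLoop L R x left right = M := by
  intro k
  induction k with
  | zero =>
    intro l r hk h0 hlM hMr
    rw [solveLoop, dif_neg (show ¬ l < r by omega)]
    omega
  | succ k ih =>
    intro l r hk h0 hlM hMr
    by_cases hlr : l < r
    · rw [solveLoop, dif_pos hlr]
      have hmid := pvMid l r hlr
      set m := PySem.Int.floordiv (l + r + 1) 2 with hm
      by_cases hP : (m + x) * (m + 1) ≤ L ∧ (m + 1 + x) * (m + 1) ≤ R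
      · rw [if_pos hP]
        have hmM : m ≤ M := hmax m (by omega) hP.1 hP.2
        exact ih m r (by omega) (by omega) hmM hMr
      · rw [if_neg hP]
        have hMm : M ≤ m - 1 := by
          by_contra hcon
          push_neg at hcon
          have h1 : (m + x) * (m + 1) ≤ L := pvClosure x L m M (by omega) (by omega) hLx hPL
          have h2 : (m + 1 + x) * (m + 1) ≤ R := by
            have h2' : (m + (x + 1)) * (m + 1) ≤ R := by
              refine pvClosure (x + 1) R m M (by omega) (by omega) (by omega) ?_
              have e : (M + (x + 1)) * (M + 1) = (M + 1 + x) * (M + 1) := by ring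
              rw [e]; exact hPR
            have e : (m + 1 + x) * (m + 1) = (m + (x + 1)) * (m + 1) := by ring
            rw [e]; exact h2'
          exact hP ⟨h1, h2⟩
        exact ih l (m - 1) (by omega) h0 hlM hMm
    · rw [solveLoop, dif_neg hlr]
      omega

-- |s| stays tiny on the bounded domain
theorem pvSmall (c B s : Int) (hc1 : -2147483650 ≤ c) (hc2 : c ≤ 2147483650)
    (hB : B ≤ 2147483648) (hs0 : 0 ≤ s)
    (hs1 : s * s ≤ (c + 1) * (c + 1) + 4 * (B - c)) : s ≤ 3000000000 := by
  by_contra h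
  push_neg at h
  have h1 : (c + 1) * (c + 1) ≤ 2147483651 * 2147483651 := by
    nlinarith [mul_nonneg (by omega : (0:Int) ≤ 2147483651 - (c + 1))
      (by omega : (0:Int) ≤ 2147483651 + (c + 1))]
  nlinarith

theorem pvMain (L R x : Int) (hD : Dom_solve L R x) : solve L R x = solve_alt L R x := by
  have hx1 : -2147483648 ≤ x ∧ x ≤ 2147483648 := by
    simp [Dom_solve, pvDomInt] at hD; omega
  have hL1 : -2147483648 ≤ L ∧ L ≤ 2147483648 := by
    simp [Dom_solve, pvDomInt] at hD; omega
  have hR1 : -2147483648 ≤ R ∧ R ≤ 2147483648 := by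
    simp [Dom_solve, pvDomInt] at hD; omega
  rw [solve, solve_alt]
  by_cases hg : L < x ∨ R < x + 1
  · rw [if_pos hg, if_pos hg]
  · rw [if_neg hg, if_neg hg]
    push_neg at hg
    obtain ⟨hLx, hRx⟩ := hg
    set s1 := pyIsqrt ((x + 1) * (x + 1) + 4 * (L - x)) with hs1def
    set s2 := pyIsqrt ((x + 2) * (x + 2) + 4 * (R - x - 1)) with hs2def
    set m1 := PySem.Int.floordiv (s1 - x - 1) 2 with hm1def
    set m2 := PySem.Int.floordiv (s2 - x - 2) 2 with hm2def
    have hD1 : (0:Int) ≤ (x + 1) * (x + 1) + 4 * (L - x) := by nlinarith [sq_nonneg (x + 1)]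
    have hD2 : (0:Int) ≤ (x + 2) * (x + 2) + 4 * (R - x - 1) := by nlinarith [sq_nonneg (x + 2)]
    have hS1 := pvIsqrt_spec _ hD1
    have hS2 := pvIsqrt_spec _ hD2
    rw [← hs1def] at hS1
    rw [← hs2def] at hS2
    have hfl1 := (PySem.Int.floordiv_eq_iff_of_pos (a := s1 - x - 1) (b := 2)
      (q := m1) (by norm_num)).mp hm1def.symm
    have hfl2 := (PySem.Int.floordiv_eq_iff_of_pos (a := s2 - x - 2) (b := 2)
      (q := m2) (by norm_num)).mp hm2def.symm
    have hq1 := pvQuad x L s1 m1 hLx hS1.1 hS1.2.1 hS1.2.2 (by omega) (by omega)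
    have hq2 : 0 ≤ m2 ∧ (m2 + (x + 1)) * (m2 + 1) ≤ R ∧
        ∀ m : Int, 0 ≤ m → (m + (x + 1)) * (m + 1) ≤ R → m ≤ m2 := by
      have e : ((x + 1) + 1) * ((x + 1) + 1) + 4 * (R - (x + 1)) =
          (x + 2) * (x + 2) + 4 * (R - x - 1) := by ring
      refine pvQuad (x + 1) R s2 m2 (by omega) hS2.1 ?_ ?_ (by omega) (by omega)
      · rw [e]; exact hS2.2.1
      · rw [e]; exact hS2.2.2
    set M := min m1 m2 with hMdef
    have hM0 : 0 ≤ M := by omega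
    have hMl : M ≤ m1 := by omega
    have hMr : M ≤ m2 := by omega
    have hPL : (M + x) * (M + 1) ≤ L := pvClosure x L M m1 hM0 hMl hLx hq1.2.1
    have hPR : (M + 1 + x) * (M + 1) ≤ R := by
      have h' : (M + (x + 1)) * (M + 1) ≤ R :=
        pvClosure (x + 1) R M m2 hM0 hMr (by omega) hq2.2.1
      have e : (M + 1 + x) * (M + 1) = (M + (x + 1)) * (M + 1) := by ring
      rw [e]; exact h'
    have hmax : ∀ m : Int, 0 ≤ m → (m + x) * (m + 1) ≤ L → (m + 1 + x) * (m + 1) ≤ R →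
        m ≤ M := by
      intro m h0 h1 h2
      have ha := hq1.2.2 m h0 h1
      have hb : m ≤ m2 := by
        refine hq2.2.2 m h0 ?_
        have e : (m + (x + 1)) * (m + 1) = (m + 1 + x) * (m + 1) := by ring
        rw [e]; exact h2
      omega
    have hsmall : s1 ≤ 3000000000 :=
      pvSmall x L s1 (by omega) (by omega) (by omega) hS1.1 hS1.2.1
    have hM18 : M ≤ 10 ^ 18 := by
      have : m1 ≤ 10 ^ 18 := by omega
      omega
    have hloop := pvLoop L R x M hM0 hPL hPR hLx hRx hmax (10 ^ 18 : Nat) 0 (10 ^ 18)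
      le_rfl le_rfl hM0 hM18
    rw [hloop]

-- ===== VERDICT (by name: the statement is the Claim_ definition above) =====
theorem solve_spec : Claim_equal_solve := by
  intro L R x hD
  unfold Spec_solve
  exact pvMain L R x hD
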